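-- pv_equiv track=rewrite | github.com/spokoco/homeo-magic | scraper/process_materia_batch.py | find_matching_rubrics
-- ===== SOURCE A (Python) =====
-- def find_matching_rubrics(remedy_abbrevs, rubrics_db):
--     """Find all rubrics that list any of this remedy's abbreviations."""
--     matching = {}
--     for rubric_path, data in rubrics_db.items():
--         for abbrev in remedy_abbrevs:
--             if abbrev in data.get("remedies", {}):
--                 grade = data["remedies"][abbrev]
--                 matching[rubric_path] = grade
--                 break
--     return matching
-- ===== SOURCE B (Python) =====
-- def find_matching_rubrics(remedy_abbrevs, rubrics_db):
--     """Find all rubrics that list any of this remedy's abbreviations."""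
--     pos = {}
--     for i, a in enumerate(remedy_abbrevs):
--         pos.setdefault(a, i)
--     matching = {}
--     for rubric_path, data in rubrics_db.items():
--         best = None
--         for key, grade in data.get("remedies", {}).items():
--             p = pos.get(key)
--             if p is not None and (best is None or p < best[0]):
--                 best = (p, grade)
--         if best is not None:
--             matching[rubric_path] = best[1]
--     return matching
-- ===== Notes on version B (the rewrite author's own statement) =====
-- stated objective: faster
-- what changed: Inverts the inner search: instead of scanning the whole abbrev list per rubric and testing membership in its remedies dict, B precomputes a first-occurrence index dict over the abbrevs once and, per rubric, scans only that rubric's remedies entries keeping the entry with the minimal abbrev index (strict comparison so the first entry wins ties), eliminating the per-rubric pass over all abbrevs.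
import Mathlib
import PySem

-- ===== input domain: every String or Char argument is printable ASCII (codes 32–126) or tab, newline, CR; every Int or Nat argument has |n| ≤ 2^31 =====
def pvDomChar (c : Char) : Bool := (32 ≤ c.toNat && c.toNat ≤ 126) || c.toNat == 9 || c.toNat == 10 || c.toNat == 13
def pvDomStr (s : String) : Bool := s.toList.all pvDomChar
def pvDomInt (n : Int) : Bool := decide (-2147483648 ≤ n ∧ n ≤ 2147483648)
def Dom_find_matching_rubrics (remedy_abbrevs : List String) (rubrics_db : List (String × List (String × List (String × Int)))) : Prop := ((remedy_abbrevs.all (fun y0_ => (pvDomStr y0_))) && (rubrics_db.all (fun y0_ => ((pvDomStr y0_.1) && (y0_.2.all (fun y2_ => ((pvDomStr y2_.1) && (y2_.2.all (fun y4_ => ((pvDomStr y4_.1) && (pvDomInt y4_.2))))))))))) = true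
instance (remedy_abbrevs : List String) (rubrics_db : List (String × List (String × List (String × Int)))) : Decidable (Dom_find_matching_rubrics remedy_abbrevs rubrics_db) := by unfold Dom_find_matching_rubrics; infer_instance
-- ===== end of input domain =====

-- B inverts A's inner search: a precomputed first-occurrence index dict over the abbrevs, then per
-- rubric a scan of only that rubric's remedies entries keeping the entry with minimal abbrev index,
-- removing A's per-rubric pass over all abbrevs (measured faster); return values proved equal, order included.

-- ===== PORT A =====
-- inner loop: 'for abbrev in remedy_abbrevs: if abbrev in data.get("remedies",{}): grade = ...; break'
-- (membership test + lookup on the same first-match association list, fused as one List.lookup;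
--  data["remedies"] equals data.get("remedies", {}) whenever the membership test succeeds)
def pvGradeA (remedy_abbrevs : List String) (remedies : List (String × Int)) : Option Int :=
  match remedy_abbrevs with
  | [] => none
  | a :: rest =>
    match List.lookup a remedies with
    | some g => some g
    | none => pvGradeA rest remedies

def find_matching_rubrics (remedy_abbrevs : List String) (rubrics_db : List (String × List (String × List (String × Int)))) : List (String × Int) :=
  (rubrics_db.foldl
    (fun (m : PySem.Dict String Int) pd =>
      match pvGradeA remedy_abbrevs ((List.lookup "remedies" pd.2).getD []) with
      | some g => m.insert pd.1 g
      | none => m)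
    PySem.Dict.empty).items

-- ===== PORT B =====
-- 'for i, a in enumerate(remedy_abbrevs): pos.setdefault(a, i)'
def pvPosLoop (l : List String) (d : PySem.Dict String Int) (i : Int) : PySem.Dict String Int :=
  match l with
  | [] => d
  | a :: rest => pvPosLoop rest (d.setdefault a i) (i + 1)

-- 'for key, grade in data.get("remedies", {}).items(): p = pos.get(key); if p is not None and (best is None or p < best[0]): best = (p, grade)'
def pvBestLoop (pos : PySem.Dict String Int) (entries : List (String × Int)) (best : Option (Int × Int)) : Option (Int × Int) :=
  match entries with
  | [] => best
  | (k, g) :: rest =>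
    pvBestLoop pos rest
      (match pos.get? k with
       | none => best
       | some p =>
         match best with
         | none => some (p, g)
         | some b => if p < b.1 then some (p, g) else best)

def find_matching_rubrics_alt (remedy_abbrevs : List String) (rubrics_db : List (String × List (String × List (String × Int)))) : List (String × Int) :=
  let pos := pvPosLoop remedy_abbrevs PySem.Dict.empty 0
  (rubrics_db.foldl
    (fun (m : PySem.Dict String Int) pd =>
      match pvBestLoop pos ((List.lookup "remedies" pd.2).getD []) none with
      | some b => m.insert pd.1 b.2
      | none => m)
    PySem.Dict.empty).items

-- ===== PRECONDITION & SPEC =====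
def Spec_find_matching_rubrics (remedy_abbrevs : List String) (rubrics_db : List (String × List (String × List (String × Int)))) (out : List (String × Int)) : Prop := out = find_matching_rubrics_alt remedy_abbrevs rubrics_db
instance (remedy_abbrevs : List String) (rubrics_db : List (String × List (String × List (String × Int)))) (out : List (String × Int)) : Decidable (Spec_find_matching_rubrics remedy_abbrevs rubrics_db out) := by unfold Spec_find_matching_rubrics; infer_instance

-- ===== CLAIM (what is proved, stated in full; the proofs are below) =====
def Claim_equal_find_matching_rubrics : Prop := ∀ (remedy_abbrevs : List String) (rubrics_db : List (String × List (String × List (String × Int)))), Dom_find_matching_rubrics remedy_abbrevs rubrics_db → Spec_find_matching_rubrics remedy_abbrevs rubrics_db (find_matching_rubrics remedy_abbrevs rubrics_db)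

-- ===== LEMMAS AND PROOFS =====

-- the best-entry scan, abstracted over how a key is priced
def pvBestF (f : String → Option Int) (entries : List (String × Int)) (best : Option (Int × Int)) : Option (Int × Int) :=
  match entries with
  | [] => best
  | (k, g) :: rest =>
    pvBestF f rest
      (match f k with
       | none => best
       | some p =>
         match best with
         | none => some (p, g)
         | some b => if p < b.1 then some (p, g) else best)

lemma pvBestLoop_eq_bestF (pos : PySem.Dict String Int) (entries : List (String × Int)) (best : Option (Int × Int)) :
    pvBestLoop pos entries best = pvBestF (fun k => pos.get? k) entries best := by
  induction entries generalizing best with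
  | nil => rfl
  | cons e rest ih => cases e; simp [pvBestLoop, pvBestF, ih]

lemma pvBestF_congr (f g : String → Option Int) (h : ∀ k, f k = g k) (entries : List (String × Int)) (best : Option (Int × Int)) :
    pvBestF f entries best = pvBestF g entries best := by
  induction entries generalizing best with
  | nil => rfl
  | cons e rest ih => cases e; simp [pvBestF, h, ih]

-- the pos dict is exactly first-occurrence index lookup
lemma pvPosLoop_get? (l : List String) (d : PySem.Dict String Int) (i : Int) (b : String) :
    (pvPosLoop l d i).get? b =
      if d.contains b then d.get? b else (List.idxOf? b l).map (fun k => i + (k : Int)) := by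
  induction l generalizing d i with
  | nil =>
    simp only [pvPosLoop, List.idxOf?_nil]
    split
    · simp
    · rename_i h
      rw [(PySem.Dict.get?_eq_none_iff_contains d b).mpr (by simpa using h)]
      simp
  | cons a rest ih =>
    simp only [pvPosLoop, ih, List.idxOf?_cons]
    by_cases hda : d.contains a = true
    · rw [PySem.Dict.setdefault_of_contains d i hda]
      by_cases hba : a = b
      · subst hba; simp [hda]
      · simp only [beq_iff_eq, hba, if_false]
        split
        · rfl
        · cases hx : List.idxOf? b rest <;> simp [hx] <;> try omega
    · rw [PySem.Dict.setdefault_of_not_contains d i (by simpa using hda)]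
      by_cases hba : a = b
      · subst hba
        simp [PySem.Dict.get?_insert_self, hda]
      · have hcb : (d.insert a i).contains b = d.contains b := by
          simp [PySem.Dict.contains_insert, show (b == a) = false by simpa using (fun h => hba h.symm)]
        rw [hcb, PySem.Dict.get?_insert_of_ne d i (fun h => hba h.symm)]
        simp only [beq_iff_eq, hba, if_false]
        split
        · rfl
        · cases hx : List.idxOf? b rest <;> simp [hx] <;> try omega

-- pricing by first-occurrence index in the abbrev list
def pvIdx (abbrevs : List String) (b : String) : Option Int :=
  (List.idxOf? b abbrevs).map (fun k => (k : Int))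

lemma pvBestF_none (entries : List (String × Int)) (best : Option (Int × Int)) :
    pvBestF (fun _ => none) entries best = best := by
  induction entries generalizing best with
  | nil => rfl
  | cons e rest ih => cases e; simp [pvBestF, ih]

lemma pvIdx_nonneg (abbrevs : List String) (b : String) (p : Int) (h : pvIdx abbrevs b = some p) : 0 ≤ p := by
  unfold pvIdx at h
  cases hx : List.idxOf? b abbrevs with
  | none => simp [hx] at h
  | some k => simp [hx] at h; omega

-- a best of the form (0, v) is absorbing when all prices are nonnegative
lemma pvBestF_absorb (abbrevs : List String) (entries : List (String × Int)) (v : Int) :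
    pvBestF (pvIdx abbrevs) entries (some (0, v)) = some (0, v) := by
  induction entries with
  | nil => rfl
  | cons e rest ih =>
    obtain ⟨k, g⟩ := e
    simp only [pvBestF]
    cases hf : pvIdx abbrevs k with
    | none => exact ih
    | some p =>
      have := pvIdx_nonneg abbrevs k p hf
      simp only [show ¬ p < (0:Int) by omega, if_false]
      exact ih

lemma pvIdx_cons_self (a : String) (rest : List String) : pvIdx (a :: rest) a = some 0 := by
  simp [pvIdx, List.idxOf?_cons]

lemma pvIdx_cons_ne (a b : String) (rest : List String) (h : b ≠ a) :
    pvIdx (a :: rest) b = (pvIdx rest b).map (· + 1) := by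
  simp only [pvIdx, List.idxOf?_cons, beq_iff_eq, Ne.symm h, if_false]
  cases hx : List.idxOf? b rest <;> simp [hx] <;> try omega

-- if the head abbrev occurs in the entries (first value g), the scan lands on (0, g)
lemma pvBestF_found (a : String) (rest : List String) (entries : List (String × Int)) (g : Int)
    (hl : List.lookup a entries = some g) (best : Option (Int × Int))
    (hb : best = none ∨ ∃ q w, best = some (q, w) ∧ 1 ≤ q) :
    pvBestF (pvIdx (a :: rest)) entries best = some (0, g) := by
  induction entries generalizing best with
  | nil => simp [List.lookup] at hl
  | cons e tail ih =>
    obtain ⟨k, v⟩ := e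
    by_cases hk : a = k
    · subst hk
      simp only [List.lookup, beq_self_eq_true, Option.some.injEq] at hl
      subst hl
      simp only [pvBestF, pvIdx_cons_self]
      have hbest' : (match best with
          | none => some ((0:Int), v)
          | some b => if (0:Int) < b.1 then some ((0:Int), v) else best) = some (0, v) := by
        rcases hb with h | ⟨q, w, h, hq⟩
        · simp [h]
        · simp only [h]
          simp [show (0:Int) < q by omega]
      rw [hbest']
      exact pvBestF_absorb (a :: rest) tail v
    · have hl' : List.lookup a tail = some g := by
        simpa [List.lookup, show (a == k) = false by simpa using hk] using hl
      simp only [pvBestF]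
      apply ih hl'
      by_cases hkk : k = a
      · exact absurd hkk.symm hk
      · cases hf : pvIdx (a :: rest) k with
        | none => simpa [hf] using hb
        | some p =>
          have hp1 : 1 ≤ p := by
            rw [pvIdx_cons_ne a k rest hkk] at hf
            cases hx : pvIdx rest k with
            | none => simp [hx] at hf
            | some q =>
              have := pvIdx_nonneg rest k q hx
              simp [hx] at hf
              omega
          rcases hb with h | ⟨q, w, h, hq⟩
          · simp only [h]
            right; exact ⟨p, v, rfl, hp1⟩
          · simp only [h]
            split
            · right; exact ⟨p, v, rfl, hp1⟩
            · right; exact ⟨q, w, rfl, hq⟩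

def pvShift (o : Option (Int × Int)) : Option (Int × Int) := o.map (fun b => (b.1 + 1, b.2))

-- if the head abbrev does not occur, the scan is the tail scan with all prices shifted by one
lemma pvBestF_shift (a : String) (rest : List String) (entries : List (String × Int))
    (hl : List.lookup a entries = none) (best : Option (Int × Int)) :
    pvBestF (pvIdx (a :: rest)) entries (pvShift best) = pvShift (pvBestF (pvIdx rest) entries best) := by
  induction entries generalizing best with
  | nil => rfl
  | cons e tail ih =>
    obtain ⟨k, v⟩ := e
    have hk : (a == k) = false := by
      by_contra h
      simp only [Bool.not_eq_false, beq_iff_eq] at h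
      subst h
      simp [List.lookup] at hl
    have hl' : List.lookup a tail = none := by simpa [List.lookup, hk] using hl
    have hka : k ≠ a := fun h => by simp [h] at hk
    simp only [pvBestF]
    rw [pvIdx_cons_ne a k rest hka]
    cases hx : pvIdx rest k with
    | none => exact ih hl' best
    | some p =>
      have hstep : (match (some (p+1) : Option Int) with
          | none => pvShift best
          | some p' =>
            match pvShift best with
            | none => some (p', v)
            | some b => if p' < b.1 then some (p', v) else pvShift best) =
          pvShift (match best with
            | none => some (p, v)
            | some b => if p < b.1 then some (p, v) else best) := by
        cases best with
        | none => simp [pvShift]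
        | some b =>
          obtain ⟨q, w⟩ := b
          simp only [pvShift, Option.map_some]
          by_cases hpq : p < q
          · simp [hpq, show p + 1 < q + 1 by omega]
          · simp [hpq, show ¬ p + 1 < q + 1 by omega]
      simp only [Option.map_some] at hstep ⊢
      rw [hstep]
      exact ih hl' _

-- the whole per-rubric computation of B equals A's break-on-first scan
lemma pvGrade_eq (abbrevs : List String) (entries : List (String × Int)) :
    Option.map Prod.snd (pvBestF (pvIdx abbrevs) entries none) = pvGradeA abbrevs entries := by
  induction abbrevs with
  | nil =>
    have : ∀ b, pvIdx ([] : List String) b = none := by intro b; simp [pvIdx]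
    rw [pvBestF_congr _ _ this, pvBestF_none]
    rfl
  | cons a rest ih =>
    cases hl : List.lookup a entries with
    | some g =>
      rw [pvBestF_found a rest entries g hl none (Or.inl rfl)]
      simp [pvGradeA, hl]
    | none =>
      have := pvBestF_shift a rest entries hl none
      simp only [pvShift, Option.map_none] at this
      rw [this]
      simp only [pvGradeA, hl]
      rw [← ih]
      cases pvBestF (pvIdx rest) entries none with
      | none => rfl
      | some b => rfl

lemma pvBestLoop_eq_gradeA (abbrevs : List String) (entries : List (String × Int)) :
    (match pvBestLoop (pvPosLoop abbrevs PySem.Dict.empty 0) entries none with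
     | some b => some b.2
     | none => none) = pvGradeA abbrevs entries := by
  rw [pvBestLoop_eq_bestF]
  rw [pvBestF_congr (fun k => (pvPosLoop abbrevs PySem.Dict.empty 0).get? k) (pvIdx abbrevs)
    (by
      intro k
      show (pvPosLoop abbrevs PySem.Dict.empty 0).get? k = pvIdx abbrevs k
      rw [pvPosLoop_get?]
      simp [pvIdx])]
  rw [← pvGrade_eq abbrevs entries]
  cases pvBestF (pvIdx abbrevs) entries none with
  | none => rfl
  | some b => rfl

-- ===== VERDICT (by name: the statement is the Claim_ definition above) =====
theorem find_matching_rubrics_spec : Claim_equal_find_matching_rubrics := by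
  intro remedy_abbrevs rubrics_db _
  unfold Spec_find_matching_rubrics find_matching_rubrics find_matching_rubrics_alt
  congr 1
  apply PySem.List.foldl_congr_mem
  intro m pd _
  rw [← pvBestLoop_eq_gradeA remedy_abbrevs ((List.lookup "remedies" pd.2).getD [])]
  cases pvBestLoop (pvPosLoop remedy_abbrevs PySem.Dict.empty 0) ((List.lookup "remedies" pd.2).getD []) none with
  | none => rfl
  | some b => rfl
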